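-- pv_equiv track=rewrite | github.com/JFlashy96/Algorithms | CodeSignal/Python/sortByHeight.py | solution
-- ===== SOURCE A (Python) =====
-- def solution(a):
--     new_a = []
--     non_neg = []
--     for i in range(0, len(a)):
--         if a[i] != -1:
--             non_neg.append(a[i])
--     non_neg.sort()
--     for i in range(0, len(a)):
--         if a[i] == -1:
--             new_a.append(a[i])
--         else:
--             new_a.append(non_neg[0])
--             non_neg.remove(non_neg[0])
--     return new_a
-- ===== SOURCE B (Python) =====
-- def solution(a):
--     positions = [i for i, x in enumerate(a) if x != -1]
--     values = sorted(a[i] for i in positions)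
--     result = list(a)
--     for i, v in zip(positions, values):
--         result[i] = v
--     return result
-- ===== Notes on version B (the rewrite author's own statement) =====
-- stated objective: faster
-- what changed: Instead of rebuilding the list element-by-element while popping the sorted queue's front with O(n) list.remove, B records the non -1 positions once, sorts the gathered values, and scatters them back by index into a copy of the input.
import Mathlib
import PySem

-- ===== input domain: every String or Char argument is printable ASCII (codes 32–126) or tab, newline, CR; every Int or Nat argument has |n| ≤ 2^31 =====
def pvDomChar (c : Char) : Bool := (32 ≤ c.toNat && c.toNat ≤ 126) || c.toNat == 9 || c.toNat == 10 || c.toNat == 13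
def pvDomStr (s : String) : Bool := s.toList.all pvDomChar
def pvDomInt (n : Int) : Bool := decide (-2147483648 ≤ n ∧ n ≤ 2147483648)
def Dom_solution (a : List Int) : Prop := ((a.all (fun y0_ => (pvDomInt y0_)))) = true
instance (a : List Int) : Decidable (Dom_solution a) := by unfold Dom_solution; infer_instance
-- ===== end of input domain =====

-- B replaces A's per-element rebuild that pops the sorted queue's front with list.remove by
-- recording the non -1 positions once, sorting the gathered values, and scattering them back
-- by index into a copy of the input (no quadratic remove).

-- ===== PORT A =====
def solution (a : List Int) : List Int :=
  let non_neg := a.foldl (fun acc x => if x ≠ -1 then acc ++ [x] else acc) []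
  let non_neg := PySem.List.sorted non_neg (fun x => x) false
  -- second loop: if a[i] == -1 append it, else append non_neg[0] and remove it
  -- (non_neg.remove(non_neg[0]) removes the first occurrence of the head, i.e. takes the tail;
  --  the [] branch is where Python would raise IndexError — never reached, the queue never runs dry)
  (a.foldl (fun (st : List Int × List Int) x =>
      if x = -1 then (st.1 ++ [x], st.2)
      else match st.2 with
        | [] => (st.1, [])
        | v :: vs => (st.1 ++ [v], vs)) ([], non_neg)).1

-- ===== PORT B =====
def solution_alt (a : List Int) : List Int :=
  let positions := ((PySem.List.enumerate a 0).filter (fun p => p.2 ≠ -1)).map (·.1)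
  let values := PySem.List.sorted (positions.map (fun i => PySem.List.pyGetD a i 0)) (fun x => x) false
  (positions.zip values).foldl (fun r p => PySem.List.pySetD r p.1 p.2) a

-- ===== PRECONDITION & SPEC =====
def Spec_solution (a : List Int) (out : List Int) : Prop := out = solution_alt a
instance (a : List Int) (out : List Int) : Decidable (Spec_solution a out) := by unfold Spec_solution; infer_instance

-- ===== CLAIM (what is proved, stated in full; the proofs are below) =====
def Claim_equal_solution : Prop := ∀ (a : List Int), Dom_solution a → Spec_solution a (solution a)

-- ===== LEMMAS AND PROOFS =====

/-- Bridge: replace the non -1 entries of `a`, left to right, by the elements of `q`. -/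
def fill : List Int → List Int → List Int
  | [], _ => []
  | x :: xs, q =>
      if x = -1 then x :: fill xs q
      else match q with
        | [] => x :: fill xs []        -- never reached when q is long enough
        | v :: vs => v :: fill xs vs

/-- positions of the non -1 entries of `a`, with enumeration starting at `s`. -/
def posOf (a : List Int) (s : Int) : List Int :=
  ((PySem.List.enumerate a s).filter (fun p => p.2 ≠ -1)).map (·.1)

lemma posOf_nil (s : Int) : posOf [] s = [] := by simp [posOf, PySem.List.enumerate_nil]

lemma posOf_cons (x : Int) (xs : List Int) (s : Int) :
    posOf (x :: xs) s = if x = -1 then posOf xs (s + 1) else s :: posOf xs (s + 1) := by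
  simp only [posOf, PySem.List.enumerate_cons, List.filter_cons]
  by_cases h : x = -1 <;> simp [h]

lemma enumerate_shift (a : List Int) (s : Int) :
    PySem.List.enumerate a (s + 1) = (PySem.List.enumerate a s).map (fun p => (p.1 + 1, p.2)) := by
  induction a generalizing s with
  | nil => simp [PySem.List.enumerate_nil]
  | cons x xs ih =>
    simp only [PySem.List.enumerate_cons, List.map_cons, ih]

lemma posOf_shift (a : List Int) (s : Int) :
    posOf a (s + 1) = (posOf a s).map (· + 1) := by
  unfold posOf
  rw [enumerate_shift, List.filter_map, List.map_map]
  simp [Function.comp_def]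

lemma posOf_nonneg (a : List Int) (s : Int) : ∀ i ∈ posOf a s, s ≤ i := by
  intro i hi
  unfold posOf at hi
  obtain ⟨p, hp, rfl⟩ := List.mem_map.mp hi
  have hpm := List.mem_of_mem_filter hp
  obtain ⟨k, hk, rfl⟩ := (PySem.List.mem_enumerate_iff a s p).mp hpm
  simp

/-- A's second loop computes `fill` (with the accumulated prefix in front), as long as the
queue holds at least one value per non -1 entry. -/
lemma loopA_eq_fill (a : List Int) : ∀ (acc q : List Int),
    (a.filter (fun x => x ≠ -1)).length ≤ q.length →
    (a.foldl (fun (st : List Int × List Int) x =>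
      if x = -1 then (st.1 ++ [x], st.2)
      else match st.2 with
        | [] => (st.1, [])
        | v :: vs => (st.1 ++ [v], vs)) (acc, q)).1 = acc ++ fill a q := by
  induction a with
  | nil => intro acc q _; simp [fill]
  | cons x xs ih =>
    intro acc q hq
    rw [List.filter_cons] at hq
    by_cases hx : x = -1
    · rw [if_neg (by simp [hx])] at hq
      simp only [List.foldl_cons, if_pos hx]
      rw [ih (acc ++ [x]) q hq]
      simp [fill, hx]
    · rw [if_pos (by simp [hx])] at hq
      simp only [List.length_cons] at hq
      match q with
      | [] => simp at hq
      | v :: vs =>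
        simp only [List.length_cons] at hq
        simp only [List.foldl_cons, if_neg hx]
        rw [ih (acc ++ [v]) vs (by omega)]
        simp [fill, hx]

/-- Scattering at indices all shifted by one leaves the head alone. -/
lemma scatter_shift (l : List (Int × Int)) : ∀ (x : Int) (r : List Int),
    (∀ p ∈ l, 0 ≤ p.1) →
    ((l.map (fun p => (p.1 + 1, p.2))).foldl
        (fun r p => PySem.List.pySetD r p.1 p.2) (x :: r)) =
      x :: l.foldl (fun r p => PySem.List.pySetD r p.1 p.2) r := by
  induction l with
  | nil => intro x r _; simp
  | cons p ps ih =>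
    intro x r hnn
    have hp : 0 ≤ p.1 := hnn p (by simp)
    have hset : PySem.List.pySetD (x :: r) (p.1 + 1) p.2 = x :: PySem.List.pySetD r p.1 p.2 := by
      rw [PySem.List.pySetD_of_nonneg _ _ (by omega), PySem.List.pySetD_of_nonneg _ _ hp]
      have h1 : (p.1 + 1).toNat = p.1.toNat + 1 := by omega
      simp [h1]
    simp only [List.map_cons, List.foldl_cons, hset]
    exact ih x _ (fun q hq => hnn q (by simp [hq]))

lemma map_shift_pairs (l : List (Int × Int)) :
    l.map (fun p : Int × Int => Prod.map (· + 1) id p) = l.map (fun p => (p.1 + 1, p.2)) := by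
  simp [Prod.map]

lemma posOf_zip_nonneg (xs : List Int) (q : List Int) :
    ∀ p ∈ (posOf xs 0).zip q, 0 ≤ p.1 := fun p hp =>
  posOf_nonneg xs 0 p.1 (List.of_mem_zip hp).1

/-- B's scatter loop computes `fill`, as long as the value list holds at least one value per
non -1 entry. -/
lemma scatter_eq_fill (a : List Int) : ∀ (q : List Int),
    (a.filter (fun x => x ≠ -1)).length ≤ q.length →
    ((posOf a 0).zip q).foldl (fun r p => PySem.List.pySetD r p.1 p.2) a = fill a q := by
  induction a with
  | nil => intro q _; simp [posOf_nil, fill]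
  | cons x xs ih =>
    intro q hq
    rw [List.filter_cons] at hq
    rw [posOf_cons]
    have hshift : posOf xs (0 + 1) = (posOf xs 0).map (· + 1) := posOf_shift xs 0
    by_cases hx : x = -1
    · rw [if_neg (by simp [hx])] at hq
      rw [if_pos hx, hshift, List.zip_map_left, map_shift_pairs,
        scatter_shift _ x xs (posOf_zip_nonneg xs q), ih q hq]
      simp [fill, hx]
    · rw [if_pos (by simp [hx])] at hq
      simp only [List.length_cons] at hq
      rw [if_neg hx]
      match q with
      | [] => simp at hq
      | v :: vs =>
        simp only [List.length_cons] at hq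
        simp only [List.zip_cons_cons, List.foldl_cons]
        have hset : PySem.List.pySetD (x :: xs) 0 v = v :: xs := by
          rw [PySem.List.pySetD_of_nonneg _ _ (by omega)]; rfl
        rw [hset, hshift, List.zip_map_left, map_shift_pairs,
          scatter_shift _ v xs (posOf_zip_nonneg xs vs), ih vs (by omega)]
        simp [fill, hx]

/-- The values B gathers at the recorded positions are exactly the non -1 entries of `a`. -/
lemma gather_eq_filter (a : List Int) :
    (posOf a 0).map (fun i => PySem.List.pyGetD a i 0) = a.filter (fun x => x ≠ -1) := by
  unfold posOf
  rw [List.map_map]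
  have hcongr : ∀ p ∈ (PySem.List.enumerate a 0).filter (fun p => p.2 ≠ -1),
      ((fun i => PySem.List.pyGetD a i 0) ∘ (·.1)) p = (fun p : Int × Int => p.2) p := by
    intro p hp
    have hpm := List.mem_of_mem_filter hp
    obtain ⟨k, hk, rfl⟩ := (PySem.List.mem_enumerate_iff a 0 p).mp hpm
    simp only [Function.comp]
    rw [PySem.List.pyGetD_eq_getElem a 0 (by omega) (by omega)]
    simp
  rw [List.map_congr_left hcongr]
  rw [show (fun p : Int × Int => decide (p.2 ≠ -1)) = ((fun x : Int => decide (x ≠ -1)) ∘ (fun p : Int × Int => p.2)) from rfl,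
    ← List.filter_map, PySem.List.map_snd_enumerate]

-- ===== VERDICT (by name: the statement is the Claim_ definition above) =====
theorem solution_spec : Claim_equal_solution := by
  intro a _
  simp only [Spec_solution, solution, solution_alt]
  rw [PySem.List.foldl_append_ite_eq_filter, List.nil_append]
  rw [show ((PySem.List.enumerate a 0).filter (fun p => p.2 ≠ -1)).map (·.1) = posOf a 0 from rfl]
  rw [gather_eq_filter]
  have hlen : (a.filter (fun x => x ≠ -1)).length
      ≤ (PySem.List.sorted (a.filter (fun x => x ≠ -1)) (fun x => x) false).length := by
    rw [PySem.List.length_sorted]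
  rw [loopA_eq_fill a [] _ hlen, List.nil_append, scatter_eq_fill a _ hlen]
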